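-- pv_equiv track=rewrite | github.com/joaovictorsaraujo/Programacao-II | provas/20241BSI0319/questao_01/q1.py | ti
-- ===== SOURCE A (Python) =====
-- def ti(mat):
--     nova = []
--     for i in range(len(mat)):
--         linha = []
--         for j in range(len(mat[i])):
--             if j <= i:
--                 linha.append(mat[i][j])
--             else:
--                 linha.append(0)
--         nova.append(linha)
--     return nova
-- ===== SOURCE B (Python) =====
-- def ti(mat):
--     return [list(row[:i + 1]) + [0] * (len(row) - (i + 1))
--             for i, row in enumerate(mat)]
-- ===== Notes on version B (the rewrite author's own statement) =====
-- stated objective: simpler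
-- what changed: Replaces the nested index loops with a per-element j<=i branch by a single comprehension that partitions each row into its kept prefix (a slice) and a zero-padded suffix.
import Mathlib
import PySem

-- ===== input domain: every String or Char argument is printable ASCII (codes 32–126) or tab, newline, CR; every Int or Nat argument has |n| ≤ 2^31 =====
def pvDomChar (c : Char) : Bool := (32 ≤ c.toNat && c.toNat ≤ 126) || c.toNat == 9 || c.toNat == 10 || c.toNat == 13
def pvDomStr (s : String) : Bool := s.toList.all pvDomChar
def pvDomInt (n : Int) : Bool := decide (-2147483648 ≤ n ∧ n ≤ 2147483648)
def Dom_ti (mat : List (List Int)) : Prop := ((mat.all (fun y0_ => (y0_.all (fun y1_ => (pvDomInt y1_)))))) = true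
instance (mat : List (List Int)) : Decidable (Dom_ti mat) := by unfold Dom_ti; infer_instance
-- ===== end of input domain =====

-- B replaces the nested index loops and per-element j<=i branch by slicing each row's
-- kept prefix and appending a zero pad (objective: simpler).

-- ===== PORT A =====
def ti (mat : List (List Int)) : List (List Int) :=
  (PySem.List.pyRange 0 mat.length 1).foldl (fun nova i =>
    nova ++ [(PySem.List.pyRange 0 (PySem.List.pyGetD mat i []).length 1).foldl (fun linha j =>
      if j ≤ i then linha ++ [PySem.List.pyGetD (PySem.List.pyGetD mat i []) j 0]
      else linha ++ [0]) []]) []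

-- ===== PORT B =====
def ti_alt (mat : List (List Int)) : List (List Int) :=
  (PySem.List.enumerate mat 0).map (fun p =>
    PySem.List.slice p.2 none (some (p.1 + 1)) ++
      List.replicate ((p.2.length : Int) - (p.1 + 1)).toNat 0)

-- ===== PRECONDITION & SPEC =====
def Spec_ti (mat : List (List Int)) (out : List (List Int)) : Prop := out = ti_alt mat
instance (mat : List (List Int)) (out : List (List Int)) : Decidable (Spec_ti mat out) := by unfold Spec_ti; infer_instance

-- ===== CLAIM (what is proved, stated in full; the proofs are below) =====
def Claim_equal_ti : Prop := ∀ (mat : List (List Int)), Dom_ti mat → Spec_ti mat (ti mat)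

-- ===== LEMMAS AND PROOFS =====

-- the inner loop of A builds the sliced-and-padded row of B
theorem ti_inner_eq (row : List Int) (i : Int) (hi : 0 ≤ i) :
    (PySem.List.pyRange 0 row.length 1).foldl (fun linha j =>
      if j ≤ i then linha ++ [PySem.List.pyGetD row j 0] else linha ++ [0]) []
    = PySem.List.slice row none (some (i + 1)) ++
        List.replicate ((row.length : Int) - (i + 1)).toNat 0 := by
  have hfold : (PySem.List.pyRange 0 row.length 1).foldl (fun linha j =>
      if j ≤ i then linha ++ [PySem.List.pyGetD row j 0] else linha ++ [0]) []
      = (PySem.List.pyRange 0 row.length 1).map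
          (fun j => if j ≤ i then PySem.List.pyGetD row j 0 else 0) := by
    have := PySem.List.foldl_append_singleton_eq_map
      (l := PySem.List.pyRange 0 row.length 1)
      (f := fun j => if j ≤ i then PySem.List.pyGetD row j 0 else 0) (acc := [])
    rw [List.nil_append] at this
    rw [← this]
    apply PySem.List.foldl_congr_mem
    intro acc j _
    split <;> rfl
  rw [hfold, PySem.List.pyRange_one, List.map_map,
    PySem.List.slice_to _ (by omega : (0:Int) ≤ i + 1)]
  apply List.ext_getElem
  · simp
    omega
  · intro k hk hk'
    simp only [List.getElem_map, List.getElem_range, Function.comp_apply]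
    have hklt : k < row.length := by simpa using hk
    rw [List.getElem_append]
    split
    · next h =>
      have hlt : k < (List.take (i + 1).toNat row).length := by
        simp only [List.length_take]
        omega
      rw [dif_pos hlt, List.getElem_take]
      simp only [zero_add, PySem.List.pyGetD_natCast]
      simp [List.getD_eq_getElem?_getD, List.getElem?_eq_getElem hklt]
    · next h =>
      have hnlt : ¬ k < (List.take (i + 1).toNat row).length := by
        simp only [List.length_take]
        omega
      rw [dif_neg hnlt, List.getElem_replicate]

-- ===== VERDICT (by name: the statement is the Claim_ definition above) =====
theorem ti_spec : Claim_equal_ti := by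
  intro mat _
  unfold Spec_ti ti ti_alt
  rw [PySem.List.enumerate_eq_map_pyRange (d := []), List.map_map,
    PySem.List.foldl_append_singleton_eq_map
      (l := PySem.List.pyRange 0 mat.length 1)
      (f := fun i =>
        (PySem.List.pyRange 0 (PySem.List.pyGetD mat i []).length 1).foldl (fun linha j =>
          if j ≤ i then linha ++ [PySem.List.pyGetD (PySem.List.pyGetD mat i []) j 0]
          else linha ++ [0]) [])]
  simp only [List.nil_append, PySem.List.len]
  apply List.map_congr_left
  intro i hi
  have h0i : 0 ≤ i := (PySem.List.mem_pyRange_one.mp hi).1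
  exact ti_inner_eq _ i h0i
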